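-- pv_equiv track=rewrite | github.com/drewrip/hunter | hunter/util.py | remove_common_prefix
-- ===== SOURCE A (Python) =====
-- from typing import List, TypeVar, Optional
--
-- def remove_common_prefix(names: List[str], sep: str = ".") \
--         -> List[str]:
--     """
--     """
--
--     if len(names) == 0:
--         return names
--
--     split_names = [name.split(sep) for name in names]
--     min_len = min(len(components) for components in split_names)
--
--     def are_same(index: int) -> bool:
--         return all(c[index] == split_names[0][index] for c in split_names)
--
--     prefix_len = 0
--     while prefix_len + 1 < min_len and are_same(prefix_len):
--         prefix_len += 1
--
--     return [sep.join(components[prefix_len:]) for components in split_names]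
-- ===== SOURCE B (Python) =====
-- def remove_common_prefix(names, sep="."):
--     if len(names) == 0:
--         return names
--     split_names = [name.split(sep) for name in names]
--     # fold a pairwise longest-common-prefix over the component lists
--     common = split_names[0]
--     for comps in split_names[1:]:
--         new = []
--         for x, y in zip(common, comps):
--             if x != y:
--                 break
--             new.append(x)
--         common = new
--     min_len = min(len(c) for c in split_names)
--     prefix_len = min(len(common), min_len - 1)
--     return [sep.join(c[prefix_len:]) for c in split_names]
-- ===== Notes on version B (the rewrite author's own statement) =====
-- stated objective: alternative
-- what changed: Replaces the index-scanning are_same/while loop with a single fold that computes the pairwise longest-common-prefix of the component lists, then caps its length at min_len - 1.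
import Mathlib
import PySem

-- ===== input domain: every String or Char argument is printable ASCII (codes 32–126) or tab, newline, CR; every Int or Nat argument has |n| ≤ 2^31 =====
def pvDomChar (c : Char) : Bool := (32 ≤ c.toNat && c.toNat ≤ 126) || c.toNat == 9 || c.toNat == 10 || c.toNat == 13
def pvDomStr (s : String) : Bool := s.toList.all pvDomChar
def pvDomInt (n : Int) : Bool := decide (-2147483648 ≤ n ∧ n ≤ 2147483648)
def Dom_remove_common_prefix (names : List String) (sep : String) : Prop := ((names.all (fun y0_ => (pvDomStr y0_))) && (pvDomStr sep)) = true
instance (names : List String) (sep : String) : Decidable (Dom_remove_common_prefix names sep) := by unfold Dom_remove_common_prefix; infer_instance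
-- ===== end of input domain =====

-- B replaces A's index-scanning are_same/while loop by a fold of pairwise longest common
-- prefixes of the component lists, capped at min_len - 1 (objective: alternative decomposition).

-- ===== PORT A =====
-- name.split(sep); Python raises ValueError for sep = "" (excluded by Pre_), where getD [] is never reached
def pvSplit (nm : String) (sep : String) : List String :=
  (PySem.Str.split? nm sep).getD []

-- are_same(index): all(c[index] == split_names[0][index] for c in split_names); the index is
-- always in range when called (compared as Options; split_names[0] exists: names nonempty)
def pvAreSame (split_names : List (List String)) (index : Nat) : Bool :=
  split_names.all (fun c => getElem? c index == getElem? (split_names.headD []) index)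

-- the while loop: 'while prefix_len + 1 < min_len and are_same(prefix_len): prefix_len += 1';
-- fuel bounds the iteration count (min_len suffices)
def pvLoopA (split_names : List (List String)) (min_len : Nat) : Nat → Nat → Nat
  | 0, prefix_len => prefix_len
  | fuel + 1, prefix_len =>
      if prefix_len + 1 < min_len ∧ pvAreSame split_names prefix_len then
        pvLoopA split_names min_len fuel (prefix_len + 1)
      else prefix_len

def remove_common_prefix (names : List String) (sep : String) : List String :=
  if names.length = 0 then names
  else
    let split_names := names.map (fun name => pvSplit name sep)
    -- min over a nonempty list; getD 0 is never reached
    let min_len := (split_names.map List.length).min?.getD 0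
    let prefix_len := pvLoopA split_names min_len min_len 0
    split_names.map (fun components => PySem.Str.join sep (components.drop prefix_len))

-- ===== PORT B =====
-- the inner zip-walk of Source B: elementwise common prefix of two component lists
def pvCommon (a : List String) (b : List String) : List String :=
  match a, b with
  | x :: a', y :: b' => if x = y then x :: pvCommon a' b' else []
  | _, _ => []

def remove_common_prefix_alt (names : List String) (sep : String) : List String :=
  match names with
  | [] => names
  | _ =>
    let split_names := names.map (fun name => pvSplit name sep)
    let common := split_names.tail.foldl pvCommon (split_names.headD [])
    let min_len := (split_names.map List.length).min?.getD 0
    let prefix_len := min common.length (min_len - 1)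
    split_names.map (fun c => PySem.Str.join sep (c.drop prefix_len))

-- ===== PRECONDITION & SPEC =====
-- Pre_ excludes only sep = "" with nonempty names, where Python's str.split raises ValueError.
def Pre_remove_common_prefix (names : List String) (sep : String) : Prop :=
  names = [] ∨ sep ≠ ""
instance (names : List String) (sep : String) : Decidable (Pre_remove_common_prefix names sep) := by unfold Pre_remove_common_prefix; infer_instance
def pvWitness_remove_common_prefix : List String × String := (["util.math.add", "util.math.sub", "util.str"], ".")

def Spec_remove_common_prefix (names : List String) (sep : String) (out : List String) : Prop := out = remove_common_prefix_alt names sep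
instance (names : List String) (sep : String) (out : List String) : Decidable (Spec_remove_common_prefix names sep out) := by unfold Spec_remove_common_prefix; infer_instance

-- ===== CLAIM (what is proved, stated in full; the proofs are below) =====
def Claim_equal_remove_common_prefix : Prop := ∀ (names : List String) (sep : String), Dom_remove_common_prefix names sep → Pre_remove_common_prefix names sep → Spec_remove_common_prefix names sep (remove_common_prefix names sep)

-- ===== LEMMAS AND PROOFS =====

theorem pvCommon_prefix_left (a b : List String) : pvCommon a b <+: a := by
  induction a generalizing b with
  | nil => simp [pvCommon]
  | cons x a' ih =>
    cases b with
    | nil => simp [pvCommon]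
    | cons y b' =>
      simp only [pvCommon]
      split_ifs with h
      · exact List.cons_prefix_cons.mpr ⟨rfl, ih b'⟩
      · exact List.nil_prefix

theorem pvCommon_prefix_right (a b : List String) : pvCommon a b <+: b := by
  induction a generalizing b with
  | nil => simp [pvCommon]
  | cons x a' ih =>
    cases b with
    | nil => simp [pvCommon]
    | cons y b' =>
      simp only [pvCommon]
      split_ifs with h
      · subst h; exact List.cons_prefix_cons.mpr ⟨rfl, ih b'⟩
      · exact List.nil_prefix

theorem pvCommon_length_ge (a b : List String) (n : Nat) (hn : n ≤ a.length)
    (h : a.take n = b.take n) : n ≤ (pvCommon a b).length := by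
  induction a generalizing b n with
  | nil => simp only [List.length_nil, Nat.le_zero] at hn; subst hn; simp
  | cons x a' ih =>
    cases n with
    | zero => simp
    | succ m =>
      cases b with
      | nil => simp at h
      | cons y b' =>
        simp only [List.take_succ_cons, List.cons.injEq] at h
        simp only [pvCommon, h.1, if_pos, List.length_cons]
        have := ih b' m (by simpa using hn) h.2
        omega

theorem pvFold_prefix (t : List (List String)) (h : List String) :
    t.foldl pvCommon h <+: h := by
  induction t generalizing h with
  | nil => simp
  | cons c t' ih =>
    exact (ih (pvCommon h c)).trans (pvCommon_prefix_left h c)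

theorem pvFold_prefix_mem (t : List (List String)) (h c : List String) (hc : c ∈ t) :
    t.foldl pvCommon h <+: c := by
  induction t generalizing h with
  | nil => cases hc
  | cons c' t' ih =>
    rcases List.mem_cons.mp hc with rfl | hc'
    · exact (pvFold_prefix t' (pvCommon h c)).trans (pvCommon_prefix_right h c)
    · exact ih (pvCommon h c') hc'

-- take commutes with a long-enough prefix
theorem pvPrefix_take (p l : List String) (n : Nat) (hp : p <+: l) (hn : n ≤ p.length) :
    l.take n = p.take n := by
  rw [List.prefix_iff_eq_take.mp hp, List.take_take, min_eq_left hn]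

theorem pvFold_length_ge (t : List (List String)) (h : List String) (n : Nat)
    (hn : n ≤ h.length) (hall : ∀ c ∈ t, h.take n = c.take n) :
    n ≤ (t.foldl pvCommon h).length := by
  induction t generalizing h with
  | nil => simpa using hn
  | cons c t' ih =>
    simp only [List.foldl_cons]
    have h1 : n ≤ (pvCommon h c).length :=
      pvCommon_length_ge h c n hn (hall c (List.mem_cons_self))
    refine ih (pvCommon h c) h1 (fun c' hc' => ?_)
    have := pvPrefix_take (pvCommon h c) h n (pvCommon_prefix_left h c) h1
    rw [← this]; exact hall c' (List.mem_cons_of_mem _ hc')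

-- a prefix agrees with the list on indices inside the prefix
theorem pvPrefix_getElem? (p l : List String) (i : Nat) (hp : p <+: l) (hi : i < p.length) :
    l[i]? = p[i]? := by
  conv_rhs => rw [List.prefix_iff_eq_take.mp hp]
  simp [hi]

-- the while loop lands exactly on target
theorem pvLoopA_eq (ss : List (List String)) (min_len target : Nat)
    (htm : target ≤ min_len - 1)
    (hT : ∀ i, i < target → pvAreSame ss i = true)
    (hstop : target < min_len - 1 → pvAreSame ss target = false) :
    ∀ fuel p, p ≤ target → target ≤ p + fuel → pvLoopA ss min_len fuel p = target := by
  intro fuel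
  induction fuel with
  | zero => intro p h1 h2; simp only [pvLoopA]; omega
  | succ f ih =>
    intro p h1 h2
    simp only [pvLoopA]
    rcases Nat.lt_or_ge p target with hlt | hge
    · rw [if_pos ⟨by omega, hT p hlt⟩]
      exact ih (p + 1) (by omega) (by omega)
    · have hpt : p = target := by omega
      subst hpt
      rcases Nat.lt_or_ge p (min_len - 1) with hc | hc
      · rw [if_neg]; simp [hstop hc]
      · rw [if_neg]; rintro ⟨h3, -⟩; omega

-- core equality of the two prefix lengths, for a nonempty split list
theorem pvPrefixLen_eq (h0 : List String) (t : List (List String)) :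
    pvLoopA (h0 :: t) (((h0 :: t).map List.length).min?.getD 0)
        (((h0 :: t).map List.length).min?.getD 0) 0
      = min ((h0 :: t).tail.foldl pvCommon ((h0 :: t).headD [])).length
            ((((h0 :: t).map List.length).min?.getD 0) - 1) := by
  set ss : List (List String) := h0 :: t with hss
  set min_len : Nat := ((ss.map List.length).min?.getD 0) with hml
  set common : List String := t.foldl pvCommon h0 with hcommon
  have hssT : ss.tail = t := rfl
  have hssH : ss.headD [] = h0 := rfl
  set L : Nat := common.length with hL
  -- min_len is ≤ every component length
  have hmin_le : ∀ c ∈ ss, min_len ≤ c.length := by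
    intro c hc
    exact List.min?_getD_le_of_mem (List.mem_map_of_mem hc)
  have hpref : ∀ c ∈ ss, common <+: c := by
    intro c hc
    rcases List.mem_cons.mp hc with rfl | hc'
    · exact pvFold_prefix t c
    · exact pvFold_prefix_mem t h0 c hc'
  have hT : ∀ i, i < min L (min_len - 1) → pvAreSame ss i = true := by
    intro i hi
    have hiL : i < L := lt_of_lt_of_le hi (min_le_left _ _)
    simp only [pvAreSame, List.all_eq_true, beq_iff_eq]
    intro c hc
    rw [pvPrefix_getElem? common c i (hpref c hc) hiL, hssH,
        pvPrefix_getElem? common h0 i (hpref h0 (List.mem_cons_self)) hiL]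
  have hstop : min L (min_len - 1) < min_len - 1 → pvAreSame ss (min L (min_len - 1)) = false := by
    intro hlt
    have hLt : min L (min_len - 1) = L := by omega
    rw [hLt]
    have hLlt : L < min_len - 1 := by omega
    by_contra hcon
    have htrue : pvAreSame ss L = true := by
      cases hb : pvAreSame ss L
      · exact absurd hb hcon
      · rfl
    simp only [pvAreSame, List.all_eq_true, beq_iff_eq, hssH] at htrue
    -- every component agrees with h0 on the first L+1 entries
    have hLen0 : L + 1 ≤ h0.length := by
      have := hmin_le h0 (List.mem_cons_self); omega
    have htake : ∀ c ∈ t, h0.take (L + 1) = c.take (L + 1) := by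
      intro c hc
      have hcL : L + 1 ≤ c.length := by
        have := hmin_le c (List.mem_cons_of_mem _ hc); omega
      have e0 : h0.take L = common.take L :=
        pvPrefix_take common h0 L (hpref h0 (List.mem_cons_self)) (le_of_eq hL.symm)
      have ec : c.take L = common.take L :=
        pvPrefix_take common c L (hpref c (List.mem_cons_of_mem _ hc)) (le_of_eq hL.symm)
      rw [List.take_add_one, List.take_add_one, ← e0.trans ec.symm,
          htrue c (List.mem_cons_of_mem _ hc)]
    have := pvFold_length_ge t h0 (L + 1) hLen0 htake
    rw [← hcommon, ← hL] at this
    omega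
  have := pvLoopA_eq ss min_len (min L (min_len - 1)) (min_le_right _ _) hT hstop
      min_len 0 (Nat.zero_le _) (by omega)
  rw [this, hssT, hssH]

-- ===== VERDICT (by name: the statement is the Claim_ definition above) =====
theorem remove_common_prefix_spec : Claim_equal_remove_common_prefix := by
  intro names sep _ _
  unfold Spec_remove_common_prefix remove_common_prefix remove_common_prefix_alt
  cases names with
  | nil => simp
  | cons n0 ns =>
    simp only [List.length_cons, Nat.succ_ne_zero, if_false, List.map_cons,
      List.tail_cons, List.headD_cons]
    have h := pvPrefixLen_eq (pvSplit n0 sep) (ns.map (fun name => pvSplit name sep))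
    simp only [List.map_cons, List.tail_cons, List.headD_cons] at h
    rw [h]
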